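-- pv_equiv track=rewrite | github.com/Parker1920/Master-Haven | The_Keeper/cogs/announcements.py | parse_blocks
-- ===== SOURCE A (Python) =====
-- def parse_blocks(text: str):
--     lines = text.splitlines()
--
--     chunks = []
--     buffer = []
--
--     empty_count = 0
--
--     for line in lines:
--         buffer.append(line)
--
--         if line.strip() == "":
--             empty_count += 1
--         else:
--             empty_count = 0
--
--         if empty_count >= 5:
--             chunks.append("\n".join(buffer[:-5]).strip())
--             buffer = []
--             empty_count = 0
--
--     if buffer:
--         chunks.append("\n".join(buffer).strip())
--
--     return [c for c in chunks if c]
-- ===== SOURCE B (Python) =====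
-- from itertools import groupby
--
--
-- def parse_blocks(text: str):
--     segments = []
--     current = []
--     for is_blank, group in groupby(text.splitlines(), key=lambda l: l.strip() == ""):
--         run = list(group)
--         if is_blank and len(run) >= 5:
--             segments.append(current)
--             current = []
--         else:
--             current.extend(run)
--     segments.append(current)
--     stripped = ["\n".join(seg).strip() for seg in segments]
--     return [c for c in stripped if c]
-- ===== Notes on version B (the rewrite author's own statement) =====
-- stated objective: alternative
-- what changed: Replaces A's single per-line pass with an append-and-count-flush buffer by a two-phase group-then-merge: itertools.groupby splits the lines into runs of blank/non-blank lines, a blank run of length >= 5 acts as a segment separator and every other run is appended to the current segment, then segments are joined, stripped and filtered.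
import Mathlib
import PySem

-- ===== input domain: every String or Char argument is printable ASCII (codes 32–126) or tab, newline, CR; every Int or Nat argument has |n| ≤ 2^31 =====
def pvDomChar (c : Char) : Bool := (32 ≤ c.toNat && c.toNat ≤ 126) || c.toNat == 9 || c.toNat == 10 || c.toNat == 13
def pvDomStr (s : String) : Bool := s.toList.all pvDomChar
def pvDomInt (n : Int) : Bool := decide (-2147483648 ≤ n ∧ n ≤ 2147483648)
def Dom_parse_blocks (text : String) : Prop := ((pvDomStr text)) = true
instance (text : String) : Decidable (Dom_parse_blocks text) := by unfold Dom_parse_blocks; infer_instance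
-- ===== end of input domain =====

-- B re-implements parse_blocks as a two-phase group-then-merge (groupby over runs of blank lines; a blank
-- run of length ≥ 5 separates segments) instead of A's per-line append-and-count-flush pass; objective: alternative.

-- ===== PORT A =====
def parse_blocks (text : String) : List String :=
  let lines := PySem.Str.splitlines text
  let st := lines.foldl
    (fun (st : List String × List String × Nat) line =>
      let buffer := st.2.1 ++ [line]
      let empty_count := if PySem.Str.strip line == "" then st.2.2 + 1 else 0
      if 5 ≤ empty_count then
        (st.1 ++ [PySem.Str.strip (PySem.Str.join "\n" (PySem.List.slice buffer none (some (-5))))], [], 0)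
      else
        (st.1, buffer, empty_count))
    ([], [], 0)
  let chunks := if st.2.1.isEmpty then st.1 else st.1 ++ [PySem.Str.strip (PySem.Str.join "\n" st.2.1)]
  chunks.filter (fun c => c != "")

-- ===== PORT B =====
-- hand port of itertools.groupby restricted to how B uses it: the list of (key, list(group)) pairs
def pyGroupbyBlank (f : String → Bool) : List String → List (Bool × List String)
  | [] => []
  | x :: xs =>
    (f x, x :: xs.takeWhile (fun y => f y == f x)) ::
      pyGroupbyBlank f (xs.dropWhile (fun y => f y == f x))
termination_by l => l.length
decreasing_by simpa using Nat.lt_succ_of_le (List.length_dropWhile_le _ _)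

def parse_blocks_alt (text : String) : List String :=
  let lines := PySem.Str.splitlines text
  let groups := pyGroupbyBlank (fun l => PySem.Str.strip l == "") lines
  let st := groups.foldl
    (fun (st : List (List String) × List String) g =>
      if g.1 && decide (5 ≤ g.2.length) then (st.1 ++ [st.2], ([] : List String))
      else (st.1, st.2 ++ g.2))
    ([], [])
  let segments := st.1 ++ [st.2]
  (segments.map (fun seg => PySem.Str.strip (PySem.Str.join "\n" seg))).filter (fun c => c != "")

-- ===== PRECONDITION & SPEC =====
def Spec_parse_blocks (text : String) (out : List String) : Prop := out = parse_blocks_alt text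
instance (text : String) (out : List String) : Decidable (Spec_parse_blocks text out) := by unfold Spec_parse_blocks; infer_instance

-- ===== CLAIM (what is proved, stated in full; the proofs are below) =====
def Claim_equal_parse_blocks : Prop := ∀ (text : String), Dom_parse_blocks text → Spec_parse_blocks text (parse_blocks text)

-- ===== LEMMAS AND PROOFS =====

def pvBlank (l : String) : Bool := PySem.Str.strip l == ""
def pvSJ (buf : List String) : String := PySem.Str.strip (PySem.Str.join "\n" buf)
def pvF (xs : List String) : List String := xs.filter (fun c => c != "")
def pvAGo : List String → List String → Nat → List String
  | [], buf, _ => if buf.isEmpty then [] else [pvSJ buf]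
  | l :: ls, buf, ec =>
    let buf' := buf ++ [l]
    let ec' := if pvBlank l then ec + 1 else 0
    if 5 ≤ ec' then pvSJ (buf'.take (buf'.length - 5)) :: pvAGo ls [] 0
    else pvAGo ls buf' ec'
theorem pvSJ_nil : pvSJ [] = "" := by decide
def pvGGo : List (Bool × List String) → List String → List (List String)
  | [], cur => [cur]
  | g :: gs, cur =>
    if g.1 && decide (5 ≤ g.2.length) then cur :: pvGGo gs [] else pvGGo gs (cur ++ g.2)
theorem pvNB (ns : List String) : ∀ (rest buf : List String) (ec : Nat),
    (∀ l ∈ ns, pvBlank l = false) →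
    pvAGo (ns ++ rest) buf ec = pvAGo rest (buf ++ ns) (if ns.isEmpty then ec else 0) := by
  induction ns with
  | nil => intro rest buf ec _; simp
  | cons l ns ih =>
    intro rest buf ec h
    have hl : pvBlank l = false := h l (by simp)
    simp only [List.cons_append, pvAGo, hl]
    norm_num
    rw [ih rest (buf ++ [l]) 0 (fun x hx => h x (by simp [hx]))]
    cases ns <;> simp
theorem pvBL_short (bs : List String) : ∀ (rest buf : List String) (ec : Nat),
    (∀ l ∈ bs, pvBlank l = true) → ec + bs.length < 5 →
    pvAGo (bs ++ rest) buf ec = pvAGo rest (buf ++ bs) (ec + bs.length) := by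
  induction bs with
  | nil => intro rest buf ec _ _; simp
  | cons b bs ih =>
    intro rest buf ec h hlt
    have hb : pvBlank b = true := h b (by simp)
    have hlt' : (ec + 1) + bs.length < 5 := by simp [List.length_cons] at hlt; omega
    have hno : ¬ 5 ≤ ec + 1 := by omega
    simp only [List.cons_append, pvAGo, hb, if_true, if_neg hno]
    rw [ih rest (buf ++ [b]) (ec + 1) (fun x hx => h x (by simp [hx])) hlt']
    rw [show buf ++ b :: bs = (buf ++ [b]) ++ bs from by simp]
    congr 1
    simp only [List.length_cons]
    omega
theorem pvBL_hit0 (bs rest buf : List String)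
    (hb : ∀ l ∈ bs, pvBlank l = true) (h5 : 5 ≤ bs.length) :
    pvAGo (bs ++ rest) buf 0 = pvSJ buf :: pvAGo (bs.drop 5 ++ rest) [] 0 := by
  match bs, h5 with
  | b1 :: b2 :: b3 :: b4 :: b5 :: bs', _ =>
    have h1 : pvBlank b1 = true := hb _ (by simp)
    have h2 : pvBlank b2 = true := hb _ (by simp)
    have h3 : pvBlank b3 = true := hb _ (by simp)
    have h4 : pvBlank b4 = true := hb _ (by simp)
    have h5' : pvBlank b5 = true := hb _ (by simp)
    simp only [List.cons_append, pvAGo, h1, h2, h3, h4, h5', if_true]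
    norm_num
theorem pvAux (bs rest buf : List String)
    (hb : ∀ l ∈ bs, pvBlank l = true) (h5 : 5 ≤ bs.length) :
    ∃ w, (∀ l ∈ w, pvBlank l = true) ∧ w.length < 5 ∧
      pvF (pvAGo (bs ++ rest) buf 0) = pvF (pvSJ buf :: pvAGo rest w w.length) := by
  rw [pvBL_hit0 bs rest buf hb h5]
  have hb' : ∀ l ∈ bs.drop 5, pvBlank l = true := fun l hl => hb l (List.mem_of_mem_drop hl)
  by_cases h : 5 ≤ (bs.drop 5).length
  · obtain ⟨w, hw, hwlen, heq⟩ := pvAux (bs.drop 5) rest [] hb' h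
    refine ⟨w, hw, hwlen, ?_⟩
    simp only [pvF, List.filter_cons]
    have : pvF (pvAGo (bs.drop 5 ++ rest) [] 0) = pvF (pvAGo rest w w.length) := by
      rw [heq]
      have : pvSJ ([] : List String) = "" := by decide
      simp [pvF, this]
    simpa [pvF] using congrArg (fun t => if (pvSJ buf != "") = true then pvSJ buf :: t else t) this
  · refine ⟨bs.drop 5, hb', by omega, ?_⟩
    rw [pvBL_short (bs.drop 5) rest [] 0 hb' (by omega)]
    simp
termination_by bs.length
decreasing_by simp only [List.length_drop]; omega
theorem pvGroupby_flatten (f : String → Bool) : ∀ (ls : List String),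
    (pyGroupbyBlank f ls).flatMap Prod.snd = ls
  | [] => by simp [pyGroupbyBlank]
  | x :: xs => by
    rw [pyGroupbyBlank]
    have ih := pvGroupby_flatten f (xs.dropWhile (fun y => f y == f x))
    simp [ih, List.takeWhile_append_dropWhile]
termination_by ls => ls.length
decreasing_by simpa using Nat.lt_succ_of_le (List.length_dropWhile_le _ _)
theorem pvGroupby_good (f : String → Bool) : ∀ (ls : List String),
    ∀ g ∈ pyGroupbyBlank f ls, g.2 ≠ [] ∧ ∀ l ∈ g.2, f l = g.1
  | [] => by simp [pyGroupbyBlank]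
  | x :: xs => by
    rw [pyGroupbyBlank]
    intro g hg
    rcases List.mem_cons.mp hg with hg | hg
    · subst hg
      refine ⟨by simp, ?_⟩
      intro l hl
      rcases List.mem_cons.mp hl with hl | hl
      · simp [hl]
      · simpa using List.mem_takeWhile_imp hl
    · exact pvGroupby_good f (xs.dropWhile (fun y => f y == f x)) g hg
termination_by ls => ls.length
decreasing_by simpa using Nat.lt_succ_of_le (List.length_dropWhile_le _ _)
theorem pvGroupby_chain (f : String → Bool) : ∀ (ls : List String),
    List.IsChain (fun a b => a.1 ≠ b.1) (pyGroupbyBlank f ls)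
  | [] => by simp [pyGroupbyBlank]
  | x :: xs => by
    rw [pyGroupbyBlank]
    refine List.IsChain.cons (pvGroupby_chain f (xs.dropWhile (fun y => f y == f x))) ?_
    intro b hb
    cases hrest : xs.dropWhile (fun y => f y == f x) with
    | nil => rw [hrest] at hb; simp [pyGroupbyBlank] at hb
    | cons y ys =>
      rw [hrest] at hb
      rw [pyGroupbyBlank] at hb
      simp only [List.head?_cons, Option.mem_some_iff] at hb
      subst hb
      have hne : xs.dropWhile (fun y => f y == f x) ≠ [] := by rw [hrest]; simp
      have hfy := List.head_dropWhile_not (fun y => f y == f x) hne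
      simp only [hrest, List.head_cons] at hfy
      simp only [beq_eq_false_iff_ne, ne_eq] at hfy
      simp only [ne_eq]
      exact fun hh => hfy hh.symm
termination_by ls => ls.length
decreasing_by simpa using Nat.lt_succ_of_le (List.length_dropWhile_le _ _)
theorem pvRstrip_nil_all {cs : List Char} (h : PySem.Chars.rstrip cs = []) :
    ∀ c ∈ cs, PySem.Chars.isspace c = true := by
  intro c hc
  unfold PySem.Chars.rstrip at h
  rw [List.reverse_eq_nil_iff, List.dropWhile_eq_nil_iff] at h
  exact h c (by simpa using hc)
theorem pvStrip_nil_all {cs : List Char} (h : PySem.Chars.strip cs = []) :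
    ∀ c ∈ cs, PySem.Chars.isspace c = true := by
  intro c hc
  unfold PySem.Chars.strip at h
  have hrest := pvRstrip_nil_all h
  have hsplit : cs = cs.takeWhile PySem.Chars.isspace ++ PySem.Chars.lstrip cs :=
    (List.takeWhile_append_dropWhile).symm
  rw [hsplit] at hc
  rcases List.mem_append.mp hc with hc | hc
  · exact List.mem_takeWhile_imp hc
  · exact hrest c hc
theorem pvAllspace_strip_nil {cs : List Char} (h : ∀ c ∈ cs, PySem.Chars.isspace c = true) :
    PySem.Chars.strip cs = [] := by
  unfold PySem.Chars.strip PySem.Chars.rstrip PySem.Chars.lstrip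
  rw [List.dropWhile_eq_nil_iff.mpr h]
  simp
theorem pvChars_blank_prefix (ws : List (List Char)) (rest : List (List Char))
    (h : ∀ cs ∈ ws, ∀ c ∈ cs, PySem.Chars.isspace c = true) :
    PySem.Chars.strip (PySem.Chars.join ['\n'] (ws ++ rest)) =
      PySem.Chars.strip (PySem.Chars.join ['\n'] rest) := by
  induction ws with
  | nil => simp
  | cons cs ws ih =>
    have hcs : ∀ c ∈ cs, PySem.Chars.isspace c = true := h cs (by simp)
    have h' : ∀ cs' ∈ ws, ∀ c ∈ cs', PySem.Chars.isspace c = true :=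
      fun cs' hcs' => h cs' (by simp [hcs'])
    cases hwr : ws ++ rest with
    | nil =>
      rcases List.append_eq_nil_iff.mp hwr with ⟨hw, hr⟩
      subst hw; subst hr
      simp only [List.append_nil, PySem.Chars.join_singleton, PySem.Chars.join_nil]
      rw [pvAllspace_strip_nil hcs]
      rfl
    | cons q qs =>
      have hjoin : PySem.Chars.join ['\n'] ((cs :: ws) ++ rest)
          = (cs ++ ['\n']) ++ PySem.Chars.join ['\n'] (ws ++ rest) := by
        rw [List.cons_append, hwr, PySem.Chars.join_cons_cons]
      rw [hjoin]
      have hpre : ∀ c ∈ cs ++ ['\n'], PySem.Chars.isspace c = true := by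
        intro c hc
        rcases List.mem_append.mp hc with hc | hc
        · exact hcs c hc
        · simp at hc; subst hc; decide
      unfold PySem.Chars.strip PySem.Chars.lstrip
      rw [List.dropWhile_append, List.dropWhile_eq_nil_iff.mpr hpre]
      simp only [List.isEmpty_nil, if_true]
      have := ih h'
      unfold PySem.Chars.strip PySem.Chars.lstrip at this
      exact this
theorem pvSJ_blank_prefix (w seg : List String) (hw : ∀ l ∈ w, pvBlank l = true) :
    pvSJ (w ++ seg) = pvSJ seg := by
  unfold pvSJ PySem.Str.strip PySem.Str.join
  congr 1
  simp only [String.toList_ofList]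
  have hmap : ∀ cs ∈ w.map String.toList, ∀ c ∈ cs, PySem.Chars.isspace c = true := by
    intro cs hcs c hc
    rcases List.mem_map.mp hcs with ⟨l, hl, rfl⟩
    have hb := hw l hl
    unfold pvBlank at hb
    have : PySem.Str.strip l = "" := by simpa using hb
    have hnil : PySem.Chars.strip l.toList = [] := by
      have := congrArg String.toList this
      rwa [PySem.Str.toList_strip] at this
    exact pvStrip_nil_all hnil c hc
  have := pvChars_blank_prefix (w.map String.toList) (seg.map String.toList) hmap
  simpa using this
theorem pvSlice_neg5 (xs : List String) :
    PySem.List.slice xs none (some (-5)) = xs.take (xs.length - 5) := by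
  simp [PySem.List.slice]
theorem pvA_fold (ls : List String) : ∀ (chunks buf : List String) (ec : Nat),
    (let st := ls.foldl
      (fun (st : List String × List String × Nat) line =>
        let buffer := st.2.1 ++ [line]
        let empty_count := if PySem.Str.strip line == "" then st.2.2 + 1 else 0
        if 5 ≤ empty_count then
          (st.1 ++ [PySem.Str.strip (PySem.Str.join "\n" (PySem.List.slice buffer none (some (-5))))], [], 0)
        else
          (st.1, buffer, empty_count))
      (chunks, buf, ec)
     if st.2.1.isEmpty then st.1 else st.1 ++ [PySem.Str.strip (PySem.Str.join "\n" st.2.1)])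
      = chunks ++ pvAGo ls buf ec := by
  induction ls with
  | nil =>
    intro chunks buf ec
    simp only [List.foldl_nil, pvAGo]
    cases buf <;> simp [pvSJ]
  | cons l ls ih =>
    intro chunks buf ec
    simp only [List.foldl_cons]
    by_cases hb : pvBlank l = true
    · have hb' : (PySem.Str.strip l == "") = true := hb
      by_cases h5 : 5 ≤ ec + 1
      · simp only [hb', if_pos h5]
        rw [ih]
        simp [pvAGo, hb, h5, pvSlice_neg5, pvSJ]
      · simp only [hb', if_neg h5]
        rw [ih]
        simp [pvAGo, hb, h5]
    · have hb' : (PySem.Str.strip l == "") = false := by simpa [pvBlank] using hb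
      have h5 : ¬ (5 ≤ 0) := by omega
      simp only [hb', Bool.false_eq_true, if_false, if_neg h5]
      rw [ih]
      simp [pvAGo, hb]
theorem pvB_fold (gs : List (Bool × List String)) : ∀ (segs : List (List String)) (cur : List String),
    (let st := gs.foldl
      (fun (st : List (List String) × List String) g =>
        if g.1 && decide (5 ≤ g.2.length) then (st.1 ++ [st.2], ([] : List String))
        else (st.1, st.2 ++ g.2))
      (segs, cur)
     st.1 ++ [st.2]) = segs ++ pvGGo gs cur := by
  induction gs with
  | nil => intro segs cur; simp [pvGGo]
  | cons g gs ih =>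
    intro segs cur
    simp only [List.foldl_cons]
    by_cases h : (g.1 && decide (5 ≤ g.2.length)) = true
    · rw [if_pos h]
      rw [ih]
      simp [pvGGo, h]
    · rw [if_neg (by simp [h])]
      rw [ih]
      simp [pvGGo, h]
theorem pvMain (gs : List (Bool × List String)) : ∀ (cur w : List String) (ec : Nat),
    (∀ g ∈ gs, g.2 ≠ [] ∧ ∀ l ∈ g.2, pvBlank l = g.1) →
    List.IsChain (fun a b => a.1 ≠ b.1) gs →
    (∀ l ∈ w, pvBlank l = true) →
    (∀ g, gs.head? = some g → g.1 = true → ec = 0) →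
    pvF (pvAGo (gs.flatMap Prod.snd) (w ++ cur) ec) = pvF ((pvGGo gs cur).map pvSJ) := by
  induction gs with
  | nil =>
    intro cur w ec _ _ hw _
    simp only [List.flatMap_nil, pvGGo, List.map_cons, List.map_nil, pvAGo]
    rw [pvSJ_blank_prefix w cur hw]
    by_cases hwc : (w ++ cur).isEmpty = true
    · have hw0 : w = [] := by simp [List.isEmpty_iff] at hwc; exact hwc.1
      have hc0 : cur = [] := by simp [List.isEmpty_iff] at hwc; exact hwc.2
      subst hw0; subst hc0
      simp [pvF, pvSJ_nil]
    · rw [if_neg hwc]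
  | cons g gs ih =>
    intro cur w ec hgood hchain hw hhead
    obtain ⟨hne, hkey⟩ := hgood g (by simp)
    have hgood' : ∀ g' ∈ gs, g'.2 ≠ [] ∧ ∀ l ∈ g'.2, pvBlank l = g'.1 :=
      fun g' hg' => hgood g' (by simp [hg'])
    have hchain' : List.IsChain (fun a b => a.1 ≠ b.1) gs := (List.isChain_cons.mp hchain).2
    have hheadne : ∀ b ∈ gs.head?, g.1 ≠ b.1 := (List.isChain_cons.mp hchain).1
    simp only [List.flatMap_cons]
    by_cases hk : g.1 = true
    · have hec : ec = 0 := hhead g rfl hk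
      subst hec
      have hbl : ∀ l ∈ g.2, pvBlank l = true := by intro l hl; rw [hkey l hl, hk]
      by_cases h5 : 5 ≤ g.2.length
      · -- separator run
        obtain ⟨w', hw', hw'len, heq⟩ := pvAux g.2 (gs.flatMap Prod.snd) (w ++ cur) hbl h5
        rw [heq]
        have hrec := ih [] w' w'.length hgood' hchain'
          hw' (by
            intro g' hg' hk'
            exfalso
            have := hheadne g' (by simp [hg'])
            rw [hk, hk'] at this
            exact this rfl)
        simp only [List.append_nil] at hrec
        have hGGo : pvGGo (g :: gs) cur = cur :: pvGGo gs [] := by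
          simp [pvGGo, hk, h5]
        rw [hGGo]
        simp only [List.map_cons]
        rw [pvSJ_blank_prefix w cur hw]
        simp only [pvF, List.filter_cons]
        rw [← pvF, ← pvF, hrec]
      · -- short blank run: absorbed
        rw [pvBL_short g.2 (gs.flatMap Prod.snd) (w ++ cur) 0 hbl (by omega)]
        have hGGo : pvGGo (g :: gs) cur = pvGGo gs (cur ++ g.2) := by
          simp [pvGGo, hk, h5]
        rw [hGGo]
        have : (w ++ cur) ++ g.2 = w ++ (cur ++ g.2) := by simp
        rw [this]
        have hhead' : ∀ g', gs.head? = some g' → g'.1 = true → 0 + g.2.length = 0 := by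
          intro g' hg' hk'
          exfalso
          have := hheadne g' (by simp [hg'])
          rw [hk, hk'] at this
          exact this rfl
        simpa using ih (cur ++ g.2) w (0 + g.2.length) hgood' hchain' hw hhead'
    · -- nonblank group
      have hk' : g.1 = false := by cases hg : g.1 <;> simp_all
      have hnb : ∀ l ∈ g.2, pvBlank l = false := by intro l hl; rw [hkey l hl, hk']
      rw [pvNB g.2 (gs.flatMap Prod.snd) (w ++ cur) ec hnb]
      have hGGo : pvGGo (g :: gs) cur = pvGGo gs (cur ++ g.2) := by
        simp [pvGGo, hk']
      rw [hGGo]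
      have hns : g.2.isEmpty = false := by simpa [List.isEmpty_iff] using hne
      rw [hns]
      have : (w ++ cur) ++ g.2 = w ++ (cur ++ g.2) := by simp
      rw [this]
      exact ih (cur ++ g.2) w 0 hgood' hchain' hw (fun _ _ _ => rfl)
theorem pv_final (text : String) : parse_blocks text = parse_blocks_alt text := by
  unfold parse_blocks parse_blocks_alt
  have hA := pvA_fold (PySem.Str.splitlines text) [] [] 0
  have hB := pvB_fold (pyGroupbyBlank (fun l => PySem.Str.strip l == "") (PySem.Str.splitlines text)) [] []
  simp only at hA hB ⊢
  rw [congrArg (List.filter (fun c => c != "")) hA,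
      congrArg (fun segs => (segs.map (fun seg => PySem.Str.strip (PySem.Str.join "\n" seg))).filter (fun c => c != "")) hB]
  simp only [List.nil_append]
  have hmain := pvMain (pyGroupbyBlank (fun l => PySem.Str.strip l == "") (PySem.Str.splitlines text))
    [] [] 0
    (pvGroupby_good _ _)
    (pvGroupby_chain _ _)
    (by intro l hl; cases hl)
    (fun _ _ _ => rfl)
  rw [pvGroupby_flatten] at hmain
  simpa [pvF, pvSJ] using hmain

-- ===== VERDICT (by name: the statement is the Claim_ definition above) =====
theorem parse_blocks_spec : Claim_equal_parse_blocks := by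
  intro text _
  unfold Spec_parse_blocks
  exact pv_final text
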